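-- pv_equiv track=rewrite | github.com/songeunm/PS | python/boj_14428.py | init_segtree
-- ===== SOURCE A (Python) =====
-- def init_segtree(nums, tree, node, l, r):
--     if l == r:
--         tree[node] = (nums[l], l)
--     else:
--         mid = (l + r) // 2
--         l_child, l_idx = init_segtree(nums, tree, node*2, l, mid)
--         r_child, r_idx = init_segtree(nums, tree, node*2+1, mid+1, r)
--         if l_child <= r_child:
--             tree[node] = (l_child, l_idx)
--         else:
--             tree[node] = (r_child, r_idx)
--     return tree[node]
-- ===== SOURCE B (Python) =====
-- def init_segtree(nums, tree, node, l, r):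
--     best = (nums[l], l)
--     for i in range(l + 1, r + 1):
--         if nums[i] < best[0]:
--             best = (nums[i], i)
--     return best
-- ===== Notes on version B (the rewrite author's own statement) =====
-- stated objective: simpler
-- what changed: Replaces the recursive segment-tree construction with a single left-to-right scan that keeps the current (min value, first index) pair; B neither builds nor mutates the tree array (equivalence is about the return value only).
-- outside the precondition, e.g. on init_segtree([2, 1, 3], [(0, 0), (0, 0)], 0, 0, 2): A returns (1, 1), B returns (1, 1)
import Mathlib
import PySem

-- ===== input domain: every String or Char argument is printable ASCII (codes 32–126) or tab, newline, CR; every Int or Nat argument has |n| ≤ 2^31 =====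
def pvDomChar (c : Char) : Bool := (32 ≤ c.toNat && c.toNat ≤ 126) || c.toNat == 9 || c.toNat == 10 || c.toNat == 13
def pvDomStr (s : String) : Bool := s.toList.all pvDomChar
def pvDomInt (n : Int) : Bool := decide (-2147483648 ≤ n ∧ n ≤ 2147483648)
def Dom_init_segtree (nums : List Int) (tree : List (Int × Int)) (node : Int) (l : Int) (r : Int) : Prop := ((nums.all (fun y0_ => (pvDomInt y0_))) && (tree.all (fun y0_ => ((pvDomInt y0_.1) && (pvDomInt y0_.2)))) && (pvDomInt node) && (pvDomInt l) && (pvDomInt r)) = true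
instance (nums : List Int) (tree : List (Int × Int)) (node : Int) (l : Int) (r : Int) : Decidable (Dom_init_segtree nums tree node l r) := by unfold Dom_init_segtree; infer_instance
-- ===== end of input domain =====

-- B replaces the recursive segment-tree build by a single left-to-right min scan; A mutates `tree`
-- in place while B does not — the equivalence proved here is about the RETURN value only.


-- ===== PORT A =====
-- Recursive transliteration of A, threading the mutated `tree` and returning (final tree, result);
-- `none` is exactly where the Python raises (IndexError) or, for r < l, recurses forever (the
-- `else none` branch is only a totalization guard; those inputs are outside Pre_).
def initSegA (nums : List Int) (tree : List (Int × Int)) (node : Int) (l : Int) (r : Int) :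
    Option (List (Int × Int) × (Int × Int)) :=
  if l = r then
    match PySem.List.pyGet? nums l with
    | none => none
    | some v =>
      match PySem.List.pySet? tree node (v, l) with
      | none => none
      | some t1 =>
        match PySem.List.pyGet? t1 node with
        | none => none
        | some res => some (t1, res)
  else if _h : l < r then
    let mid := PySem.Int.floordiv (l + r) 2
    match initSegA nums tree (node * 2) l mid with
    | none => none
    | some (t1, lc) =>
      match initSegA nums t1 (node * 2 + 1) (mid + 1) r with
      | none => none
      | some (t2, rc) =>
        match (if lc.1 ≤ rc.1 then PySem.List.pySet? t2 node lc
               else PySem.List.pySet? t2 node rc) with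
        | none => none
        | some t3 =>
          match PySem.List.pyGet? t3 node with
          | none => none
          | some res => some (t3, res)
  else none
termination_by (r - l).toNat
decreasing_by
  · have hm : PySem.Int.floordiv (l + r) 2 = (l + r) / 2 :=
      PySem.Int.floordiv_eq_ediv_of_pos (by norm_num)
    simp only [hm]; omega
  · have hm : PySem.Int.floordiv (l + r) 2 = (l + r) / 2 :=
      PySem.Int.floordiv_eq_ediv_of_pos (by norm_num)
    simp only [hm]; omega

def init_segtree (nums : List Int) (tree : List (Int × Int)) (node : Int) (l : Int) (r : Int) : Int × Int :=
  ((initSegA nums tree node l r).map Prod.snd).getD (0, 0)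

-- ===== PORT B =====
-- Source B: best = (nums[l], l); for i in range(l+1, r+1): if nums[i] < best[0]: best = (nums[i], i)
def init_segtree_alt (nums : List Int) (tree : List (Int × Int)) (node : Int) (l : Int) (r : Int) : Int × Int :=
  ((PySem.List.pyGet? nums l).bind (fun v =>
      (PySem.List.pyRange (l + 1) (r + 1) 1).foldlM
        (fun best i =>
          (PySem.List.pyGet? nums i).map
            (fun w => if w < best.1 then (w, i) else best))
        (v, l))).getD (0, 0)

-- ===== PRECONDITION & SPEC =====
-- Pre_ = the natural domain: a non-empty in-range segment and a tree with room for node's COMPLETE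
-- subtree of depth ⌈log2 (r-l+1)⌉ (on either side of 0, since Python indices wrap). The exact set
-- of node indices A writes has no closed form (it depends on where the recursion's uneven splits
-- fall), so Pre_ uses this standard sufficient capacity bound; it excludes some exactly-fitting
-- trees on which A still returns (see the cited examples), where B returns the same value.
def Pre_init_segtree (nums : List Int) (tree : List (Int × Int)) (node : Int) (l : Int) (r : Int) : Prop :=
  l ≤ r ∧ -(nums.length : Int) ≤ l ∧ r < (nums.length : Int) ∧
    (if 0 ≤ node then
        (node + 1) * 2 ^ (Nat.clog 2 (r - l + 1).toNat) ≤ (tree.length : Int)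
     else
        -(tree.length : Int) ≤ node * 2 ^ (Nat.clog 2 (r - l + 1).toNat))
instance (nums : List Int) (tree : List (Int × Int)) (node : Int) (l : Int) (r : Int) : Decidable (Pre_init_segtree nums tree node l r) := by unfold Pre_init_segtree; infer_instance

def pvWitness_init_segtree : List Int × (List (Int × Int)) × Int × Int × Int :=
  ([5, 2, 7, 2], [(0, 0), (0, 0), (0, 0), (0, 0), (0, 0), (0, 0), (0, 0), (0, 0)], 1, 0, 3)

def Spec_init_segtree (nums : List Int) (tree : List (Int × Int)) (node : Int) (l : Int) (r : Int) (out : Int × Int) : Prop := out = init_segtree_alt nums tree node l r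
instance (nums : List Int) (tree : List (Int × Int)) (node : Int) (l : Int) (r : Int) (out : Int × Int) : Decidable (Spec_init_segtree nums tree node l r out) := by unfold Spec_init_segtree; infer_instance

-- ===== CLAIM (what is proved, stated in full; the proofs are below) =====
def Claim_equal_init_segtree : Prop := ∀ (nums : List Int) (tree : List (Int × Int)) (node : Int) (l : Int) (r : Int), Dom_init_segtree nums tree node l r → Pre_init_segtree nums tree node l r → Spec_init_segtree nums tree node l r (init_segtree nums tree node l r)

-- ===== LEMMAS AND PROOFS =====

-- the scan step of B, and the pure value both programs compute
def scanStep (nums : List Int) (best : Int × Int) (i : Int) : Int × Int :=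
  if PySem.List.pyGetD nums i 0 < best.1 then (PySem.List.pyGetD nums i 0, i) else best

def pureScan (nums : List Int) (l r : Int) : Int × Int :=
  (PySem.List.pyRange (l + 1) (r + 1) 1).foldl (scanStep nums) (PySem.List.pyGetD nums l 0, l)

-- small facts about Python indexing used on both sides
lemma pyIdx_of_inRange (n : Nat) (i : Int) (h1 : -(n : Int) ≤ i) (h2 : i < (n : Int)) :
    ∃ k, PySem.List.pyIdx? n i = some k ∧ k < n := by
  unfold PySem.List.pyIdx?
  by_cases h0 : 0 ≤ i
  · rw [if_pos h0, if_pos (by omega : i < (n : Int))]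
    exact ⟨i.toNat, rfl, by omega⟩
  · rw [if_neg h0, if_pos (by omega : -(n : Int) ≤ i)]
    exact ⟨n - (-i).toNat, rfl, by omega⟩

lemma pyGet?_eq_some_pyGetD {α : Type} [Inhabited α] (xs : List α) (i : Int) (d : α)
    (h1 : -(xs.length : Int) ≤ i) (h2 : i < (xs.length : Int)) :
    PySem.List.pyGet? xs i = some (PySem.List.pyGetD xs i d) := by
  have h : PySem.List.pyGet? xs i ≠ none :=
    fun hc => ((PySem.List.pyGet?_eq_none_iff xs i).mp hc) ⟨h1, h2⟩
  obtain ⟨v, hv⟩ := Option.ne_none_iff_exists'.mp h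
  rw [hv]; simp [PySem.List.pyGetD, hv]

lemma pySet?_inRange {α : Type} (xs : List α) (i : Int) (v : α)
    (h1 : -(xs.length : Int) ≤ i) (h2 : i < (xs.length : Int)) :
    ∃ t, PySem.List.pySet? xs i v = some t ∧ t.length = xs.length ∧
      PySem.List.pyGet? t i = some v := by
  obtain ⟨k, hk, hkl⟩ := pyIdx_of_inRange xs.length i h1 h2
  refine ⟨xs.set k v, by simp [PySem.List.pySet?, hk], by simp, ?_⟩
  simp [PySem.List.pyGet?, List.length_set, hk, List.getElem?_set_self hkl]

-- B's fold restarted at the head of a sublist (the heart of the split argument)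
lemma foldl_scanStep_from (nums : List Int) :
    ∀ (is : List Int) (i0 : Int) (b : Int × Int),
      List.foldl (scanStep nums) b (i0 :: is) =
        (if (List.foldl (scanStep nums) (PySem.List.pyGetD nums i0 0, i0) is).1 < b.1
         then List.foldl (scanStep nums) (PySem.List.pyGetD nums i0 0, i0) is else b) := by
  intro is
  induction is with
  | nil =>
    intro i0 b
    simp only [List.foldl, scanStep]
  | cons i1 is ih =>
    intro i0 b
    have h1 := ih i1 (scanStep nums b i0)
    have h2 := ih i1 (PySem.List.pyGetD nums i0 0, i0)
    simp only [List.foldl] at h1 h2 ⊢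
    rw [h1, h2]
    simp only [scanStep]
    split_ifs <;> first | rfl | (exfalso; simp_all; omega)

lemma pureScan_leaf (nums : List Int) (l : Int) :
    pureScan nums l l = (PySem.List.pyGetD nums l 0, l) := by
  simp [pureScan, PySem.List.pyRange_one_eq_nil (by omega : l + 1 ≤ l + 1)]

lemma pureScan_split (nums : List Int) (l mid r : Int) (h1 : l ≤ mid) (h2 : mid < r) :
    pureScan nums l r =
      (if (pureScan nums l mid).1 ≤ (pureScan nums (mid + 1) r).1
       then pureScan nums l mid else pureScan nums (mid + 1) r) := by
  have hsplit := PySem.List.pyRange_one_append (l + 1) (mid + 1) (r + 1) (by omega) (by omega)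
  have hcons := PySem.List.pyRange_one_cons (a := mid + 1) (b := r + 1) (by omega)
  rw [pureScan, hsplit, List.foldl_append, hcons, foldl_scanStep_from]
  rw [show (PySem.List.pyRange (l + 1) (mid + 1)).foldl (scanStep nums)
        (PySem.List.pyGetD nums l 0, l) = pureScan nums l mid from rfl]
  rw [show (PySem.List.pyRange (mid + 1 + 1) (r + 1)).foldl (scanStep nums)
        (PySem.List.pyGetD nums (mid + 1) 0, mid + 1) = pureScan nums (mid + 1) r from rfl]
  split_ifs <;> first | rfl | (exfalso; omega)

-- B's Option fold returns the pure scan when every visited index is in range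
lemma foldlM_scan_eq (nums : List Int) :
    ∀ (is : List Int) (b : Int × Int),
      (∀ i ∈ is, -(nums.length : Int) ≤ i ∧ i < (nums.length : Int)) →
      (is.foldlM (fun best i =>
          (PySem.List.pyGet? nums i).map
            (fun w => if w < best.1 then (w, i) else best)) b : Option (Int × Int)) =
        some (is.foldl (scanStep nums) b) := by
  intro is
  induction is with
  | nil => intro b _; rfl
  | cons i is ih =>
    intro b h
    obtain ⟨h1, h2⟩ := h i (by simp)
    simp only [List.foldlM_cons, pyGet?_eq_some_pyGetD nums i 0 h1 h2,
      Option.map_some, Option.bind_some, bind, Option.bind_some]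
    rw [ih _ (fun j hj => h j (by simp [hj]))]
    rfl

lemma alt_eq_pureScan (nums : List Int) (tree : List (Int × Int)) (node l r : Int)
    (h1 : -(nums.length : Int) ≤ l) (h2 : l ≤ r) (h3 : r < (nums.length : Int)) :
    init_segtree_alt nums tree node l r = pureScan nums l r := by
  unfold init_segtree_alt
  rw [pyGet?_eq_some_pyGetD nums l 0 h1 (by omega)]
  simp only [Option.bind_some]
  rw [foldlM_scan_eq nums _ _ (fun i hi => by
    have := (PySem.List.mem_pyRange_one).mp hi
    omega)]
  rfl

-- the capacity bound Pre_ carries, as a standalone predicate on the proof side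
def capOK (node l r : Int) (m : Nat) : Prop :=
  if 0 ≤ node then (node + 1) * 2 ^ (Nat.clog 2 (r - l + 1).toNat) ≤ (m : Int)
  else -(m : Int) ≤ node * 2 ^ (Nat.clog 2 (r - l + 1).toNat)

lemma capOK_inRange (node l r : Int) (m : Nat) (h : capOK node l r m) (hlr : l ≤ r) :
    -(m : Int) ≤ node ∧ node < (m : Int) := by
  unfold capOK at h
  have hp : (1 : Int) ≤ 2 ^ (Nat.clog 2 (r - l + 1).toNat) := one_le_pow₀ (by norm_num)
  have hm : (0 : Int) ≤ (m : Int) := by positivity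
  split_ifs at h with h0
  · have := mul_le_mul_of_nonneg_left hp (show (0 : Int) ≤ node + 1 by omega)
    constructor
    · omega
    · nlinarith
  · have := mul_le_mul_of_nonpos_left hp (show node ≤ 0 by omega)
    constructor
    · nlinarith
    · omega

lemma clog_step (l r mid : Int) (hlr : l < r) (hmid : mid = PySem.Int.floordiv (l + r) 2) :
    l ≤ mid ∧ mid < r ∧
      Nat.clog 2 (r - l + 1).toNat = Nat.clog 2 (mid - l + 1).toNat + 1 ∧
      Nat.clog 2 (r - mid).toNat ≤ Nat.clog 2 (mid - l + 1).toNat := by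
  have hm : mid = (l + r) / 2 := by
    rw [hmid]; exact PySem.Int.floordiv_eq_ediv_of_pos (by norm_num)
  have hb1 : l ≤ mid := by omega
  have hb2 : mid < r := by omega
  have hs : (r - l + 1).toNat ≥ 2 := by omega
  have hL : (mid - l + 1).toNat = ((r - l + 1).toNat + 2 - 1) / 2 := by omega
  have hmono : (r - mid).toNat ≤ (mid - l + 1).toNat := by omega
  refine ⟨hb1, hb2, ?_, Nat.clog_mono_right 2 hmono⟩
  rw [Nat.clog_of_two_le (by norm_num) hs, hL]

lemma capOK_children (node l r mid : Int) (m : Nat) (hlr : l < r)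
    (hmid : mid = PySem.Int.floordiv (l + r) 2) (h : capOK node l r m) :
    capOK (node * 2) l mid m ∧ capOK (node * 2 + 1) (mid + 1) r m := by
  obtain ⟨hb1, hb2, hD, hDR⟩ := clog_step l r mid hlr hmid
  set DL := Nat.clog 2 (mid - l + 1).toNat with hDL
  set DR := Nat.clog 2 (r - (mid + 1) + 1).toNat with hDR'
  have hDR2 : DR ≤ DL := by
    have : (r - (mid + 1) + 1) = r - mid := by ring
    rw [hDR', this]; exact hDR
  have hpL : (1 : Int) ≤ 2 ^ DL := one_le_pow₀ (by norm_num)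
  have hpR : (1 : Int) ≤ 2 ^ DR := one_le_pow₀ (by norm_num)
  have hmono : (2 : Int) ^ DR ≤ 2 ^ DL := pow_le_pow_right₀ (by norm_num) hDR2
  have hpow : (2 : Int) ^ (Nat.clog 2 (r - l + 1).toNat) = 2 ^ DL * 2 := by
    rw [hD, pow_succ]
  unfold capOK at h ⊢
  rw [hpow] at h
  constructor
  · by_cases h0 : 0 ≤ node
    · rw [if_pos h0] at h
      rw [if_pos (by omega : 0 ≤ node * 2)]
      nlinarith
    · rw [if_neg h0] at h
      rw [if_neg (by omega : ¬ 0 ≤ node * 2)]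
      nlinarith
  · by_cases h0 : 0 ≤ node
    · rw [if_pos h0] at h
      rw [if_pos (by omega : 0 ≤ node * 2 + 1)]
      nlinarith [mul_le_mul_of_nonneg_left hmono (show (0 : Int) ≤ node * 2 + 2 by omega)]
    · rw [if_neg h0] at h
      rw [if_neg (by omega : ¬ 0 ≤ node * 2 + 1)]
      nlinarith [mul_le_mul_of_nonpos_left hmono (show node ≤ 0 by omega)]

lemma A_leaf (nums : List Int) (tree : List (Int × Int)) (node l : Int)
    (h1 : -(nums.length : Int) ≤ l) (h3 : l < (nums.length : Int))
    (hc : capOK node l l tree.length) :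
    ∃ t', initSegA nums tree node l l = some (t', pureScan nums l l) ∧
      t'.length = tree.length := by
  obtain ⟨hn1, hn2⟩ := capOK_inRange node l l tree.length hc (le_refl l)
  obtain ⟨t1, hset, hlen, hget⟩ :=
    pySet?_inRange tree node (PySem.List.pyGetD nums l 0, l) hn1 hn2
  refine ⟨t1, ?_, hlen⟩
  rw [initSegA]
  rw [if_pos rfl, pyGet?_eq_some_pyGetD nums l 0 h1 h3]
  simp only [hset, hget, pureScan_leaf]

lemma A_correct (nums : List Int) :
    ∀ (k : Nat) (l r node : Int) (tree : List (Int × Int)),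
      (r - l).toNat ≤ k → l ≤ r → -(nums.length : Int) ≤ l → r < (nums.length : Int) →
      capOK node l r tree.length →
      ∃ t', initSegA nums tree node l r = some (t', pureScan nums l r) ∧
        t'.length = tree.length := by
  intro k
  induction k with
  | zero =>
    intro l r node tree hk hlr h1 h3 hc
    have : l = r := by omega
    subst this
    exact A_leaf nums tree node l h1 h3 hc
  | succ k ih =>
    intro l r node tree hk hlr h1 h3 hc
    by_cases heq : l = r
    · subst heq
      exact A_leaf nums tree node l h1 h3 hc
    · have hlt : l < r := by omega
      set mid := PySem.Int.floordiv (l + r) 2 with hmid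
      obtain ⟨hb1, hb2, _, _⟩ := clog_step l r mid hlt hmid
      obtain ⟨hcL, hcR⟩ := capOK_children node l r mid tree.length hlt hmid hc
      obtain ⟨t1, e1, len1⟩ := ih l mid (node * 2) tree (by omega) hb1 h1 (by omega) hcL
      have hcR' : capOK (node * 2 + 1) (mid + 1) r t1.length := by rw [len1]; exact hcR
      obtain ⟨t2, e2, len2⟩ := ih (mid + 1) r (node * 2 + 1) t1 (by omega) (by omega)
        (by omega) h3 hcR'
      obtain ⟨hn1, hn2⟩ := capOK_inRange node l r tree.length hc hlr
      have hn1' : -(t2.length : Int) ≤ node := by rw [len2, len1]; exact hn1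
      have hn2' : node < (t2.length : Int) := by rw [len2, len1]; exact hn2
      have hsplit := pureScan_split nums l mid r hb1 hb2
      by_cases hcmp : (pureScan nums l mid).1 ≤ (pureScan nums (mid + 1) r).1
      · obtain ⟨t3, hset, hlen3, hget⟩ :=
          pySet?_inRange t2 node (pureScan nums l mid) hn1' hn2'
        refine ⟨t3, ?_, by rw [hlen3, len2, len1]⟩
        rw [initSegA]
        simp only [if_neg heq, dif_pos hlt, ← hmid, e1, e2, if_pos hcmp, hset, hget]
        rw [hsplit, if_pos hcmp]
      · obtain ⟨t3, hset, hlen3, hget⟩ :=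
          pySet?_inRange t2 node (pureScan nums (mid + 1) r) hn1' hn2'
        refine ⟨t3, ?_, by rw [hlen3, len2, len1]⟩
        rw [initSegA]
        simp only [if_neg heq, dif_pos hlt, ← hmid, e1, e2, if_neg hcmp, hset, hget]
        rw [hsplit, if_neg hcmp]

-- ===== VERDICT (by name: the statement is the Claim_ definition above) =====
theorem init_segtree_spec : Claim_equal_init_segtree := by
  intro nums tree node l r _ hpre
  obtain ⟨hlr, h1, h3, hcap⟩ := hpre
  obtain ⟨t', hA, -⟩ := A_correct nums (r - l).toNat l r node tree (le_refl _) hlr h1 h3 hcap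
  unfold Spec_init_segtree init_segtree
  rw [hA, alt_eq_pureScan nums tree node l r h1 hlr h3]
  rfl
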